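-- pv_equiv track=rewrite | github.com/gharrison91/camp-connect | backend/app/services/ai_service.py | _detect_entity_links
-- ===== SOURCE A (Python) =====
-- from typing import Any, Dict, List, Optional, Tuple
--
-- ENTITY_LINK_MAP = {
--     "camper_id": "campers",
--     "contact_id": "contacts",
--     "family_id": "families",
--     "event_id": "events",
--     "staff_id": "staff",
--     "registration_id": "registrations",
--     "activity_id": "activities",
--     "user_id": "staff",
-- }
--
-- def _detect_entity_links(columns: List[str]) -> Dict[str, str]:
--     """
--     Detect which columns in the result set are entity IDs that should become
--     clickable links. Returns a mapping of column_name -> entity_type.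
--     e.g. {"camper_id": "campers", "contact_id": "contacts"}
--     """
--     links = {}
--     for col in columns:
--         col_lower = col.lower()
--         for pattern, entity_type in ENTITY_LINK_MAP.items():
--             if col_lower == pattern or col_lower.endswith(f"_{pattern}"):
--                 links[col] = entity_type
--                 break
--     return links
-- ===== SOURCE B (Python) =====
-- ENTITY_LINK_MAP = {
--     "camper_id": "campers",
--     "contact_id": "contacts",
--     "family_id": "families",
--     "event_id": "events",
--     "staff_id": "staff",
--     "registration_id": "registrations",
--     "activity_id": "activities",
--     "user_id": "staff",
-- }
--
-- def _detect_entity_links(columns):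
--     # Every pattern is exactly two '_'-separated segments, so a column matches
--     # (equality or '_'-boundary suffix) iff the join of its last two lowered
--     # segments is a key: one dict lookup per column, no scan over the patterns.
--     links = {}
--     for col in columns:
--         segments = col.lower().split('_')
--         entity_type = ENTITY_LINK_MAP.get('_'.join(segments[-2:]))
--         if entity_type is not None:
--             links[col] = entity_type
--     return links
-- ===== Notes on version B (the rewrite author's own statement) =====
-- stated objective: faster
-- what changed: B replaces A's inner scan over the 8 ENTITY_LINK_MAP patterns (equality or '_'+pattern suffix test per pattern) by a single dict lookup keyed on the '_'-join of the column's last two lowered segments; every pattern is exactly two segments, so the tests coincide.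
import Mathlib
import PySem

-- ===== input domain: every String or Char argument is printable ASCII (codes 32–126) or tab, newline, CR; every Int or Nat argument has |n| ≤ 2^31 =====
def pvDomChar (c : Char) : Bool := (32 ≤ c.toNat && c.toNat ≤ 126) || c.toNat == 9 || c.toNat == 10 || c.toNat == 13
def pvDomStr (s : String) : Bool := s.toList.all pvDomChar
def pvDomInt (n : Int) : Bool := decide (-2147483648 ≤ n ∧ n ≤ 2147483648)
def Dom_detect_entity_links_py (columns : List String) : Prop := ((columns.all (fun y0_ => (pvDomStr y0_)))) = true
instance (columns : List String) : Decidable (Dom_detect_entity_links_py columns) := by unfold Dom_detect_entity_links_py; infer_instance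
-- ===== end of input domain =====

-- B replaces A's inner scan over the 8 patterns by a single dict lookup keyed on the
-- join of the column's last two lowered '_'-segments (alternative decomposition).

-- ===== PORT A =====
def pvEntityMap : PySem.Dict String String :=
  PySem.Dict.ofList
    [("camper_id", "campers"), ("contact_id", "contacts"), ("family_id", "families"),
     ("event_id", "events"), ("staff_id", "staff"), ("registration_id", "registrations"),
     ("activity_id", "activities"), ("user_id", "staff")]

-- A's inner `for pattern, entity_type in ENTITY_LINK_MAP.items(): … break`
def pvScanPatterns (col_lower : List Char) : List (String × String) → Option String
  | [] => none
  | (pattern, entity_type) :: rest =>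
    if col_lower == pattern.toList || PySem.Chars.endswith col_lower ('_' :: pattern.toList)
    then some entity_type
    else pvScanPatterns col_lower rest

def detect_entity_links_py (columns : List String) : List (String × String) :=
  (columns.foldl (fun links col =>
      match pvScanPatterns (PySem.Chars.lower col.toList) pvEntityMap.items with
      | some entity_type => links.insert col entity_type
      | none => links)
    PySem.Dict.empty).items

-- ===== PORT B =====
def detect_entity_links_py_alt (columns : List String) : List (String × String) :=
  (columns.foldl (fun links col =>
      let segments := PySem.Chars.splitOn (PySem.Chars.lower col.toList) ['_']
      match pvEntityMap.get?
          (String.ofList (PySem.Chars.join ['_'] (PySem.List.slice segments (some (-2)) none))) with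
      | some entity_type => links.insert col entity_type
      | none => links)
    PySem.Dict.empty).items

-- ===== PRECONDITION & SPEC =====
def Spec_detect_entity_links_py (columns : List String) (out : List (String × String)) : Prop := out = detect_entity_links_py_alt columns
instance (columns : List String) (out : List (String × String)) : Decidable (Spec_detect_entity_links_py columns out) := by unfold Spec_detect_entity_links_py; infer_instance

-- ===== CLAIM (what is proved, stated in full; the proofs are below) =====
def Claim_equal_detect_entity_links_py : Prop := ∀ (columns : List String), Dom_detect_entity_links_py columns → Spec_detect_entity_links_py columns (detect_entity_links_py columns)

-- ===== LEMMAS AND PROOFS =====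

-- splitting on a single '_' as a plain structural recursion (proof-side mirror of Chars.splitOn)
def splitU : List Char → List (List Char)
  | [] => [[]]
  | '_' :: rest => [] :: splitU rest
  | c :: rest => (splitU rest).modifyHead (c :: ·)

theorem splitU_cons_ne (rest : List Char) {c : Char} (hc : c ≠ '_') :
    splitU (c :: rest) = (splitU rest).modifyHead (c :: ·) := by
  rw [splitU.eq_def]
  split
  · rename_i h; cases h
  · rename_i h; exact absurd (List.cons.injEq .. ▸ congrArg id h) (by simp_all)
  · rename_i h; rw [(List.cons.inj h).1, (List.cons.inj h).2]

theorem splitU_ne_nil (l : List Char) : splitU l ≠ [] := by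
  match l with
  | [] => simp [splitU]
  | c :: rest =>
    by_cases h : c = '_'
    · subst h; simp [splitU]
    · rw [splitU_cons_ne rest h]
      simp [List.modifyHead_eq_nil_iff, splitU_ne_nil rest]

theorem go_eq (l : List Char) : ∀ (fuel : Nat) (cur : List Char) (acc : List (List Char)),
    l.length < fuel →
    PySem.Chars.splitOn.go ['_'] fuel l cur acc
      = acc.reverse ++ (splitU l).modifyHead (cur.reverse ++ ·) := by
  induction l with
  | nil =>
    intro fuel cur acc h
    match fuel with
    | fuel + 1 => simp [PySem.Chars.splitOn.go, splitU]
  | cons c rest ih =>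
    intro fuel cur acc h
    match fuel with
    | fuel + 1 =>
      by_cases hc : c = '_'
      · subst hc
        rw [show PySem.Chars.splitOn.go ['_'] (fuel+1) ('_'::rest) cur acc
            = PySem.Chars.splitOn.go ['_'] fuel rest [] (cur.reverse :: acc) by
          simp [PySem.Chars.splitOn.go, List.isPrefixOf]]
        rw [ih fuel [] (cur.reverse :: acc) (by simpa using h)]
        rcases hs : splitU rest with _ | ⟨a, t⟩
        · exact absurd hs (splitU_ne_nil rest)
        · simp [splitU, hs]
      · rw [show PySem.Chars.splitOn.go ['_'] (fuel+1) (c::rest) cur acc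
            = PySem.Chars.splitOn.go ['_'] fuel rest (c :: cur) acc by
          simp [PySem.Chars.splitOn.go, List.isPrefixOf, Ne.symm hc]]
        rw [ih fuel (c :: cur) acc (by simpa using h)]
        rw [splitU_cons_ne rest hc]
        rcases hs : splitU rest with _ | ⟨a, t⟩
        · exact absurd hs (splitU_ne_nil rest)
        · simp

theorem splitOn_eq_splitU (l : List Char) : PySem.Chars.splitOn l ['_'] = splitU l := by
  rw [PySem.Chars.splitOn, go_eq l (l.length + 1) [] [] (by omega)]
  rcases hs : splitU l with _ | ⟨a, t⟩
  · exact absurd hs (splitU_ne_nil l)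
  · simp

theorem splitU_nosep (w : List Char) (hw : '_' ∉ w) : splitU w = [w] := by
  induction w with
  | nil => simp [splitU]
  | cons c rest ih =>
    have hc : c ≠ '_' := fun h => hw (h ▸ List.mem_cons_self ..)
    rw [splitU_cons_ne rest hc, ih (fun h => hw (List.mem_cons_of_mem _ h))]
    simp

theorem splitU_append (u v : List Char) : splitU (u ++ '_' :: v) = splitU u ++ splitU v := by
  induction u with
  | nil => simp [splitU]
  | cons c rest ih =>
    by_cases hc : c = '_'
    · subst hc; simp [splitU, ih]
    · rw [List.cons_append, splitU_cons_ne _ hc, splitU_cons_ne _ hc, ih]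
      rcases hs : splitU rest with _ | ⟨a, t⟩
      · exact absurd hs (splitU_ne_nil rest)
      · simp

theorem intercalate_pair (a b : List Char) : ['_'].intercalate [a, b] = a ++ '_' :: b := by
  simp [List.intercalate]

theorem intercalate_cc (a b : List Char) (t : List (List Char)) :
    ['_'].intercalate (a :: b :: t) = a ++ '_' :: ['_'].intercalate (b :: t) := by
  simp [List.intercalate]

theorem intercalate_append_ne (xs ys : List (List Char)) (hx : xs ≠ []) (hy : ys ≠ []) :
    ['_'].intercalate (xs ++ ys) = ['_'].intercalate xs ++ '_' :: ['_'].intercalate ys := by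
  induction xs with
  | nil => exact absurd rfl hx
  | cons a t ih =>
    rcases t with _ | ⟨a', t'⟩
    · rcases ys with _ | ⟨b, t''⟩
      · exact absurd rfl hy
      · simp [List.intercalate]
    · have ih' := ih (by simp)
      simp only [List.cons_append] at ih'
      rw [List.cons_append, List.cons_append, intercalate_cc, ih', intercalate_cc]
      simp

theorem join_splitU (l : List Char) : ['_'].intercalate (splitU l) = l := by
  induction l with
  | nil => simp [splitU, List.intercalate]
  | cons c rest ih =>
    by_cases hc : c = '_'
    · subst hc
      rw [show splitU ('_' :: rest) = [] :: splitU rest from rfl]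
      rw [show ([] : List Char) :: splitU rest = [([] : List Char)] ++ splitU rest from rfl,
        intercalate_append_ne _ _ (by simp) (splitU_ne_nil rest), ih]
      simp [List.intercalate]
    · rw [splitU_cons_ne rest hc]
      rcases hs : splitU rest with _ | ⟨a, t⟩
      · exact absurd hs (splitU_ne_nil rest)
      · rcases t with _ | ⟨a', t'⟩
        · simpa [List.intercalate] using (hs ▸ ih : ['_'].intercalate [a] = rest)
        · rw [List.modifyHead_cons, intercalate_cc]
          rw [hs, intercalate_cc] at ih
          rw [List.cons_append, ih]

theorem slice_neg2 {α : Type} (xs : List α) :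
    PySem.List.slice xs (some (-2)) none = xs.drop (xs.length - 2) := by
  simp only [PySem.List.slice, PySem.List.clampIdx]
  norm_num
  rcases Nat.lt_or_ge xs.length 2 with h | h
  · rw [if_pos (by omega)]
    simp [List.take_of_length_le, Nat.sub_eq_zero_of_le (le_of_lt h)]
  · rw [if_neg (by omega)]
    rw [show ((xs.length : Int) + -2).toNat = xs.length - 2 by omega]
    apply List.take_of_length_le
    simp

-- the key B computes for a lowered column
def keyU (l : List Char) : List Char :=
  PySem.Chars.join ['_'] (PySem.List.slice (splitU l) (some (-2)) none)

theorem keyU_eq_iff (pa pb l : List Char) (ha : '_' ∉ pa) (hb : '_' ∉ pb) :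
    keyU l = pa ++ '_' :: pb ↔ (l = pa ++ '_' :: pb ∨ ('_' :: (pa ++ '_' :: pb)) <:+ l) := by
  unfold keyU PySem.Chars.join
  rw [slice_neg2]
  constructor
  · intro hkey
    rcases Nat.lt_or_ge (splitU l).length 3 with h | h
    · left
      rw [Nat.sub_eq_zero_of_le (by omega), List.drop_zero, join_splitU] at hkey
      exact hkey
    · right
      have hsplit : splitU l = (splitU l).take ((splitU l).length - 2)
          ++ (splitU l).drop ((splitU l).length - 2) := (List.take_append_drop _ _).symm
      have hlen2 : ((splitU l).drop ((splitU l).length - 2)).length = 2 := by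
        rw [List.length_drop]; omega
      obtain ⟨a, b, hab⟩ := List.length_eq_two.mp hlen2
      have htk : (splitU l).take ((splitU l).length - 2) ≠ [] := by
        intro hnil
        have := congrArg List.length hnil
        simp [List.length_take] at this
        omega
      have hl : l = ['_'].intercalate ((splitU l).take ((splitU l).length - 2))
          ++ '_' :: (a ++ '_' :: b) := by
        conv_lhs => rw [← join_splitU l]
        conv_lhs => rw [hsplit, hab]
        rw [intercalate_append_ne _ _ htk (by simp), intercalate_pair]
      rw [hab, intercalate_pair] at hkey
      refine ⟨['_'].intercalate ((splitU l).take ((splitU l).length - 2)), ?_⟩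
      rw [← hkey]
      exact hl.symm
  · intro hcase
    rcases hcase with heq | ⟨u, hu⟩
    · subst heq
      rw [splitU_append, splitU_nosep pa ha, splitU_nosep pb hb]
      simp [intercalate_pair]
    · subst hu
      rw [splitU_append, splitU_append, splitU_nosep pa ha, splitU_nosep pb hb]
      rw [show splitU u ++ ([pa] ++ [pb]) = splitU u ++ [pa, pb] from rfl]
      rw [show (splitU u ++ [pa, pb]).length - 2 = (splitU u).length by simp]
      rw [List.drop_left, intercalate_pair]

theorem cond_eq (pa pb l : List Char) (ha : '_' ∉ pa) (hb : '_' ∉ pb)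
    (p : String) (hp : p.toList = pa ++ '_' :: pb) :
    (l == p.toList || PySem.Chars.endswith l ('_' :: p.toList))
      = (p == String.ofList (keyU l)) := by
  rw [Bool.eq_iff_iff]
  simp only [Bool.or_eq_true, beq_iff_eq, PySem.Chars.endswith_iff]
  rw [show (p = String.ofList (keyU l)) ↔ keyU l = p.toList by
    constructor
    · rintro rfl; simp
    · intro h; rw [h, String.ofList_toList]]
  rw [hp, keyU_eq_iff pa pb l ha hb]

set_option maxHeartbeats 1000000 in
theorem scan_eq_get (l : List Char) :
    pvScanPatterns l pvEntityMap.items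
      = pvEntityMap.get? (String.ofList (keyU l)) := by
  have h1 := cond_eq "camper".toList "id".toList l (by decide) (by decide) "camper_id" (by decide)
  have h2 := cond_eq "contact".toList "id".toList l (by decide) (by decide) "contact_id" (by decide)
  have h3 := cond_eq "family".toList "id".toList l (by decide) (by decide) "family_id" (by decide)
  have h4 := cond_eq "event".toList "id".toList l (by decide) (by decide) "event_id" (by decide)
  have h5 := cond_eq "staff".toList "id".toList l (by decide) (by decide) "staff_id" (by decide)
  have h6 := cond_eq "registration".toList "id".toList l (by decide) (by decide) "registration_id" (by decide)
  have h7 := cond_eq "activity".toList "id".toList l (by decide) (by decide) "activity_id" (by decide)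
  have h8 := cond_eq "user".toList "id".toList l (by decide) (by decide) "user_id" (by decide)
  rw [show pvEntityMap = PySem.Dict.mk
    [("camper_id", "campers"), ("contact_id", "contacts"), ("family_id", "families"),
     ("event_id", "events"), ("staff_id", "staff"), ("registration_id", "registrations"),
     ("activity_id", "activities"), ("user_id", "staff")] from by rfl]
  simp only [pvScanPatterns, PySem.Dict.get?_mk_cons]
  rw [h1, h2, h3, h4, h5, h6, h7, h8]
  simp [PySem.Dict.get?]

-- ===== VERDICT (by name: the statement is the Claim_ definition above) =====
set_option maxHeartbeats 1000000 in
theorem detect_entity_links_py_spec : Claim_equal_detect_entity_links_py := by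
  intro columns _
  unfold Spec_detect_entity_links_py detect_entity_links_py detect_entity_links_py_alt
  congr 1
  apply List.foldl_ext
  intro links col _
  rw [splitOn_eq_splitU, scan_eq_get]
  rfl
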